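-- pv_equiv track=rewrite | github.com/ihemmige/comp_genomics_class | hw2/auxiliary_code/q6b.py | find_high_low_quality
-- ===== SOURCE A (Python) =====
-- def phred33_to_q(qual):
--   """ Turn Phred+33 ASCII-encoded quality into Phred-scaled integer """
--   return ord(qual)-33
--
-- def find_high_low_quality(reads):
--   min_quality = float('inf')
--   min_index = -1
--   max_quality = float('-inf')
--   max_index = -1
--
--   for i, read in enumerate(reads):
--     quality = read[2]
--     total_quality = sum(phred33_to_q(c) for c in quality)
--     # if new minimum
--     if total_quality < min_quality:
--       min_index = i
--       min_quality = total_quality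
--     # if new maximum
--     if total_quality > max_quality:
--       max_index = i
--       max_quality = total_quality
--   return min_index + 1, max_index + 1
-- ===== SOURCE B (Python) =====
-- def find_high_low_quality(reads):
--     pairs = [(sum(ord(c) - 33 for c in read[2]), i) for i, read in enumerate(reads)]
--     if not pairs:
--         return 0, 0
--     lo = sorted(pairs, key=lambda p: (p[0], p[1]))[0]
--     hi = sorted(pairs, key=lambda p: (-p[0], p[1]))[0]
--     return lo[1] + 1, hi[1] + 1
-- ===== Notes on version B (the rewrite author's own statement) =====
-- stated objective: alternative
-- what changed: Replaces A's single interleaved min/max-tracking loop with float sentinels by a sort-based argmin/argmax: build (total, index) pairs once, then take the head of the list sorted by (total, index) for the minimum and by (-total, index) for the maximum; the lexicographic index tie-break reproduces A's first-occurrence choice.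
import Mathlib
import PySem

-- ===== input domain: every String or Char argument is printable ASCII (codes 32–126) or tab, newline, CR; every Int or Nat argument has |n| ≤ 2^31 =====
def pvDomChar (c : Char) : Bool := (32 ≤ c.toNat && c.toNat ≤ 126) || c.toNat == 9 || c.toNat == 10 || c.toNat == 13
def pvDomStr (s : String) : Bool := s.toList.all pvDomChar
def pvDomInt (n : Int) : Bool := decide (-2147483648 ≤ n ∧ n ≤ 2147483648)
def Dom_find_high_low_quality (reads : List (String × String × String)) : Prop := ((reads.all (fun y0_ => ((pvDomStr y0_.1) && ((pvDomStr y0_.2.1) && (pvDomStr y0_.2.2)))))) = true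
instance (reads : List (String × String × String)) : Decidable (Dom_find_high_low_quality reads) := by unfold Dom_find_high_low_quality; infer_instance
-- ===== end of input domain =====

-- B replaces A's single interleaved min/max-tracking loop (inf sentinels) by building (total, index)
-- pairs and taking the head of two lexicographic sorts (keys (total,i) and (-total,i)); alternative algorithm.


-- ===== PORT A =====
-- phred33_to_q(qual) = ord(qual) - 33
def pv_phred33_to_q (c : Char) : Int := (c.toNat : Int) - 33

-- the body of A's for-loop: update (min_quality,min_index),(max_quality,max_index);
-- float('inf')/float('-inf') sentinels are modelled as Option.none (any int beats them)
def pv_stepA (st : (Option Int × Int) × (Option Int × Int)) (p : Int × (String × String × String)) :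
    (Option Int × Int) × (Option Int × Int) :=
  let tq := (p.2.2.2.toList.map pv_phred33_to_q).foldl (· + ·) 0
  let mn := match st.1.1 with
    | none => (some tq, p.1)
    | some m => if tq < m then (some tq, p.1) else st.1
  let mx := match st.2.1 with
    | none => (some tq, p.1)
    | some m => if m < tq then (some tq, p.1) else st.2
  (mn, mx)

def find_high_low_quality (reads : List (String × String × String)) : Int × Int :=
  let st := (PySem.List.enumerate reads 0).foldl pv_stepA ((none, -1), (none, -1))
  (st.1.2 + 1, st.2.2 + 1)

-- ===== PORT B =====
-- one entry of B's pairs table: (sum(ord(c) - 33 for c in read[2]), i)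
def pv_total (read : String × String × String) : Int :=
  read.2.2.toList.foldl (fun a c => a + ((c.toNat : Int) - 33)) 0

def find_high_low_quality_alt (reads : List (String × String × String)) : Int × Int :=
  let pairs := (PySem.List.enumerate reads 0).map (fun p => (pv_total p.2, p.1))
  if pairs.isEmpty then (0, 0)
  else
    let lo := (PySem.List.sorted2 pairs (fun p => p.1) (fun p => p.2)).headD (0, 0)
    let hi := (PySem.List.sorted2 pairs (fun p => -p.1) (fun p => p.2)).headD (0, 0)
    (lo.2 + 1, hi.2 + 1)

-- ===== PRECONDITION & SPEC =====
def Spec_find_high_low_quality (reads : List (String × String × String)) (out : Int × Int) : Prop := out = find_high_low_quality_alt reads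
instance (reads : List (String × String × String)) (out : Int × Int) : Decidable (Spec_find_high_low_quality reads out) := by unfold Spec_find_high_low_quality; infer_instance

-- ===== CLAIM (what is proved, stated in full; the proofs are below) =====
def Claim_equal_find_high_low_quality : Prop := ∀ (reads : List (String × String × String)), Dom_find_high_low_quality reads → Spec_find_high_low_quality reads (find_high_low_quality reads)

-- ===== LEMMAS AND PROOFS =====

-- pairs table of B for a suffix of the reads, starting at index s
def pv_pairs (reads : List (String × String × String)) (s : Int) : List (Int × Int) :=
  (PySem.List.enumerate reads s).map (fun p => (pv_total p.2, p.1))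

-- A's running minimum / maximum with first-occurrence tie-breaking, over (total, index) pairs
def scanMinP : List (Int × Int) → (Int × Int) → (Int × Int)
  | [], st => st
  | p :: ps, st => scanMinP ps (if p.1 < st.1 then p else st)

def scanMaxP : List (Int × Int) → (Int × Int) → (Int × Int)
  | [], st => st
  | p :: ps, st => scanMaxP ps (if st.1 < p.1 then p else st)

theorem pairs_cons (r : String × String × String) (rest : List (String × String × String)) (s : Int) :
    pv_pairs (r :: rest) s = (pv_total r, s) :: pv_pairs rest (s + 1) := by
  simp [pv_pairs, PySem.List.enumerate_cons]

theorem pairs_pairwise (reads : List (String × String × String)) (s : Int) :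
    (pv_pairs reads s).Pairwise (fun a b => a.2 < b.2) := by
  exact (PySem.List.pairwise_lt_enumerate reads s).map _ (fun a b h => h)

theorem tq_eq (read : String × String × String) :
    (read.2.2.toList.map pv_phred33_to_q).foldl (· + ·) 0 = pv_total read := by
  rw [List.foldl_map]; rfl

-- A's loop in terms of scanMinP / scanMaxP on the pairs table
theorem foldA_eq (reads : List (String × String × String)) :
    ∀ (s q j Q J : Int),
    (PySem.List.enumerate reads s).foldl pv_stepA ((some q, j), (some Q, J))
      = ((some (scanMinP (pv_pairs reads s) (q, j)).1, (scanMinP (pv_pairs reads s) (q, j)).2),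
         (some (scanMaxP (pv_pairs reads s) (Q, J)).1, (scanMaxP (pv_pairs reads s) (Q, J)).2)) := by
  induction reads with
  | nil => intro s q j Q J; simp [PySem.List.enumerate, pv_pairs, scanMinP, scanMaxP]
  | cons r rest ih =>
    intro s q j Q J
    rw [PySem.List.enumerate_cons, pairs_cons]
    simp only [List.foldl_cons, scanMinP, scanMaxP]
    show (PySem.List.enumerate rest (s+1)).foldl pv_stepA (pv_stepA ((some q, j), (some Q, J)) (s, r)) = _
    simp only [pv_stepA, tq_eq]
    by_cases h1 : pv_total r < q <;> by_cases h2 : Q < pv_total r <;>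
      simp [h1, h2, ih]

-- scanMinP computes the lexicographically smallest of st :: P (indices strictly increase)
theorem scanMinP_spec (P : List (Int × Int)) :
    ∀ st : Int × Int, (st :: P).Pairwise (fun a b => a.2 < b.2) →
    scanMinP P st ∈ st :: P ∧
      ∀ y ∈ st :: P, (scanMinP P st).1 < y.1 ∨ ((scanMinP P st).1 = y.1 ∧ (scanMinP P st).2 ≤ y.2) := by
  induction P with
  | nil =>
    intro st _
    simp only [scanMinP]
    refine ⟨List.mem_cons_self, ?_⟩
    intro y hy
    have hy' : y = st := by simpa using hy
    subst hy'; right; omega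
  | cons p ps ih =>
    intro st h
    rw [List.pairwise_cons] at h
    obtain ⟨hst, hp⟩ := h
    rw [List.pairwise_cons] at hp
    obtain ⟨hpps, hps⟩ := hp
    by_cases h1 : p.1 < st.1
    · have h' : (p :: ps).Pairwise (fun a b => a.2 < b.2) := List.pairwise_cons.mpr ⟨hpps, hps⟩
      obtain ⟨hmem, hmin⟩ := ih p h'
      refine ⟨?_, ?_⟩
      · simp only [scanMinP, if_pos h1]
        rcases List.mem_cons.mp hmem with h | h
        · exact List.mem_cons.mpr (Or.inr (List.mem_cons.mpr (Or.inl h)))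
        · exact List.mem_cons.mpr (Or.inr (List.mem_cons.mpr (Or.inr h)))
      · intro y hy
        simp only [scanMinP, if_pos h1]
        rcases List.mem_cons.mp hy with rfl | hy
        · -- y = st : minimum key ≤ p.1 < st.1
          have := hmin p List.mem_cons_self
          left; omega
        · exact hmin y hy
    · have h' : (st :: ps).Pairwise (fun a b => a.2 < b.2) := by
        refine List.pairwise_cons.mpr ⟨?_, hps⟩
        intro b hb; exact lt_trans (hst p List.mem_cons_self) (hpps b hb)
      obtain ⟨hmem, hmin⟩ := ih st h'
      refine ⟨?_, ?_⟩
      · simp only [scanMinP, if_neg h1]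
        rcases List.mem_cons.mp hmem with h | h
        · exact List.mem_cons.mpr (Or.inl h)
        · exact List.mem_cons.mpr (Or.inr (List.mem_cons.mpr (Or.inr h)))
      · intro y hy
        simp only [scanMinP, if_neg h1]
        rcases List.mem_cons.mp hy with rfl | hy2
        · exact hmin y List.mem_cons_self
        rcases List.mem_cons.mp hy2 with rfl | hy3
        · -- y = p, st.1 ≤ p.1
          have hmst := hmin st List.mem_cons_self
          by_cases h2 : (scanMinP ps st).1 < y.1
          · left; exact h2
          · right
            have he : (scanMinP ps st).1 = y.1 := by omega
            refine ⟨he, ?_⟩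
            have : (scanMinP ps st).2 ≤ st.2 := by omega
            have := hst y List.mem_cons_self
            omega
        · exact hmin y (List.mem_cons.mpr (Or.inr hy3))

theorem scanMaxP_spec (P : List (Int × Int)) :
    ∀ st : Int × Int, (st :: P).Pairwise (fun a b => a.2 < b.2) →
    scanMaxP P st ∈ st :: P ∧
      ∀ y ∈ st :: P, y.1 < (scanMaxP P st).1 ∨ ((scanMaxP P st).1 = y.1 ∧ (scanMaxP P st).2 ≤ y.2) := by
  induction P with
  | nil =>
    intro st _
    simp only [scanMaxP]
    refine ⟨List.mem_cons_self, ?_⟩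
    intro y hy
    have hy' : y = st := by simpa using hy
    subst hy'; right; omega
  | cons p ps ih =>
    intro st h
    rw [List.pairwise_cons] at h
    obtain ⟨hst, hp⟩ := h
    rw [List.pairwise_cons] at hp
    obtain ⟨hpps, hps⟩ := hp
    by_cases h1 : st.1 < p.1
    · have h' : (p :: ps).Pairwise (fun a b => a.2 < b.2) := List.pairwise_cons.mpr ⟨hpps, hps⟩
      obtain ⟨hmem, hmax⟩ := ih p h'
      refine ⟨?_, ?_⟩
      · simp only [scanMaxP, if_pos h1]
        rcases List.mem_cons.mp hmem with h | h
        · exact List.mem_cons.mpr (Or.inr (List.mem_cons.mpr (Or.inl h)))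
        · exact List.mem_cons.mpr (Or.inr (List.mem_cons.mpr (Or.inr h)))
      · intro y hy
        simp only [scanMaxP, if_pos h1]
        rcases List.mem_cons.mp hy with rfl | hy
        · have := hmax p List.mem_cons_self
          left; omega
        · exact hmax y hy
    · have h' : (st :: ps).Pairwise (fun a b => a.2 < b.2) := by
        refine List.pairwise_cons.mpr ⟨?_, hps⟩
        intro b hb; exact lt_trans (hst p List.mem_cons_self) (hpps b hb)
      obtain ⟨hmem, hmax⟩ := ih st h'
      refine ⟨?_, ?_⟩
      · simp only [scanMaxP, if_neg h1]
        rcases List.mem_cons.mp hmem with h | h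
        · exact List.mem_cons.mpr (Or.inl h)
        · exact List.mem_cons.mpr (Or.inr (List.mem_cons.mpr (Or.inr h)))
      · intro y hy
        simp only [scanMaxP, if_neg h1]
        rcases List.mem_cons.mp hy with rfl | hy2
        · exact hmax y List.mem_cons_self
        rcases List.mem_cons.mp hy2 with rfl | hy3
        · have hmst := hmax st List.mem_cons_self
          by_cases h2 : y.1 < (scanMaxP ps st).1
          · left; exact h2
          · right
            have he : (scanMaxP ps st).1 = y.1 := by omega
            refine ⟨he, ?_⟩
            have : (scanMaxP ps st).2 ≤ st.2 := by omega
            have := hst y List.mem_cons_self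
            omega
        · exact hmax y (List.mem_cons.mpr (Or.inr hy3))

-- sorted2 with two Int keys is sorted with the corresponding lexicographic key
theorem sorted2_eq_sorted_lex {α : Type} (xs : List α) (k1 k2 : α → Int) :
    PySem.List.sorted2 xs k1 k2 = PySem.List.sorted xs (fun x => toLex (k1 x, k2 x)) := by
  unfold PySem.List.sorted2 PySem.List.sorted
  simp only [if_neg (by decide : ¬ (false = true))]
  have hb : (fun a b => decide (k1 a < k1 b) || (!decide (k1 b < k1 a) && decide (k2 a < k2 b)))
      = (fun a b => decide ((toLex (k1 a, k2 a) : Lex (Int × Int)) < toLex (k1 b, k2 b))) := by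
    funext a b
    by_cases h1 : k1 a < k1 b <;> by_cases h2 : k1 b < k1 a <;> by_cases h3 : k2 a < k2 b <;>
      simp [Prod.Lex.lt_iff, h1, h2, h3] <;> omega
  rw [hb]

-- the head of a key-sorted list equals any member that is a key-lower bound (injective key)
theorem head_sorted_eq_of_lb {α κ : Type} [LinearOrder κ] (P : List α) (key : α → κ)
    (hinj : Function.Injective key) {m : α} {t : List α}
    (hs : PySem.List.sorted P key = m :: t) {r : α} (hr : r ∈ P)
    (hlb : ∀ y ∈ P, key r ≤ key y) : m = r := by
  have hm : m ∈ P := (PySem.List.sorted_perm P key false).mem_iff.mp (by rw [hs]; exact List.mem_cons_self)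
  exact hinj (le_antisymm (PySem.List.key_head_sorted_le P key hs r hr) (hlb m hm))

-- ===== VERDICT (by name: the statement is the Claim_ definition above) =====
theorem find_high_low_quality_spec : Claim_equal_find_high_low_quality := by
  unfold Claim_equal_find_high_low_quality
  intro reads _
  unfold Spec_find_high_low_quality
  cases reads with
  | nil => decide
  | cons r rest =>
    -- A side
    unfold find_high_low_quality
    rw [PySem.List.enumerate_cons]
    simp only [List.foldl_cons]
    set t0 := pv_total r with ht0
    have hstep : pv_stepA ((none, -1), (none, -1)) (0, r) = ((some t0, 0), (some t0, 0)) := by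
      simp [pv_stepA, tq_eq, ht0]
    rw [hstep]
    simp only [zero_add]
    rw [foldA_eq rest 1 t0 0 t0 0]
    -- B side
    unfold find_high_low_quality_alt
    have hP0 : (PySem.List.enumerate (r :: rest) 0).map (fun p => (pv_total p.2, p.1))
        = (t0, 0) :: pv_pairs rest 1 := by
      simp [pv_pairs, ht0]
    rw [hP0]
    simp only [List.isEmpty_cons, if_neg Bool.false_ne_true]
    -- pairwise indices on the full pairs list
    have hpw : ((t0, 0) :: pv_pairs rest 1).Pairwise (fun a b : Int × Int => a.2 < b.2) := by
      have := pairs_pairwise (r :: rest) 0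
      rw [pairs_cons] at this
      simpa [ht0] using this
    -- minimum side
    obtain ⟨rmem, rmin⟩ := scanMinP_spec (pv_pairs rest 1) ((t0, 0)) hpw
    have hne : PySem.List.sorted ((t0, 0) :: pv_pairs rest 1)
        (fun p => (toLex (p.1, p.2) : Lex (Int × Int))) ≠ [] := by
      rw [Ne, PySem.List.sorted_eq_nil_iff]; simp
    obtain ⟨m, t, hmt⟩ : ∃ m t, PySem.List.sorted ((t0, 0) :: pv_pairs rest 1)
        (fun p => (toLex (p.1, p.2) : Lex (Int × Int))) = m :: t := by
      cases hl : PySem.List.sorted ((t0, 0) :: pv_pairs rest 1)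
          (fun p => (toLex (p.1, p.2) : Lex (Int × Int))) with
      | nil => exact absurd hl hne
      | cons m t => exact ⟨m, t, rfl⟩
    have hmin : m = scanMinP (pv_pairs rest 1) (t0, 0) := by
      refine head_sorted_eq_of_lb _ _ ?_ hmt rmem ?_
      · intro a b h
        have := toLex_inj.mp h
        exact Prod.ext (congrArg Prod.fst this) (congrArg Prod.snd this)
      · intro y hy
        have := rmin y hy
        rw [Prod.Lex.le_iff]
        simpa using this
    -- maximum side
    obtain ⟨Rmem, Rmax⟩ := scanMaxP_spec (pv_pairs rest 1) ((t0, 0)) hpw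
    have hne' : PySem.List.sorted ((t0, 0) :: pv_pairs rest 1)
        (fun p => (toLex (-p.1, p.2) : Lex (Int × Int))) ≠ [] := by
      rw [Ne, PySem.List.sorted_eq_nil_iff]; simp
    obtain ⟨M, T, hMT⟩ : ∃ M T, PySem.List.sorted ((t0, 0) :: pv_pairs rest 1)
        (fun p => (toLex (-p.1, p.2) : Lex (Int × Int))) = M :: T := by
      cases hl : PySem.List.sorted ((t0, 0) :: pv_pairs rest 1)
          (fun p => (toLex (-p.1, p.2) : Lex (Int × Int))) with
      | nil => exact absurd hl hne'
      | cons M T => exact ⟨M, T, rfl⟩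
    have hmax : M = scanMaxP (pv_pairs rest 1) (t0, 0) := by
      refine head_sorted_eq_of_lb _ _ ?_ hMT Rmem ?_
      · intro a b h
        have h' : ((-a.1, a.2) : Int × Int) = (-b.1, b.2) := toLex_inj.mp h
        obtain ⟨h1, h2⟩ := Prod.mk.inj h'
        have h3 : a.1 = b.1 := by omega
        exact Prod.ext h3 h2
      · intro y hy
        have := Rmax y hy
        rw [Prod.Lex.le_iff]
        simp only [ofLex_toLex]
        omega
    rw [sorted2_eq_sorted_lex ((t0, 0) :: pv_pairs rest 1) (fun p => p.1) (fun p => p.2),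
        sorted2_eq_sorted_lex ((t0, 0) :: pv_pairs rest 1) (fun p => -p.1) (fun p => p.2)]
    simp only [Prod.mk.eta] at hmt ⊢
    rw [hmt, hMT]
    simp [hmin, hmax]
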